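-- pv_equiv track=rewrite | github.com/smartqin/PrimePath | graph1.py | findprime
-- ===== SOURCE A (Python) =====
-- def findprime(paths):
--         primepath=[]
--         length=len(paths)
--         for i in range(length-1):
--             flag=0
--             #print"a=",all_paths[i]
--             for j in range(i+1,length):
--             #print all_paths1[i]
--                 A=paths[i]
--                 B=paths[j]
--                 #print"B=",B
--                 if(A_inc_B(A,B)):
--                     flag=1
--                     break
--             if(flag==0):
--                 primepath.append(A)
--         primepath.append(paths[length-1])
--         return primepath
--
-- def A_inc_B(A,B):
--         if(any([A==B[i:i+len(A)] for i in range(0,len(B)-len(A)+1)])):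
--                 return 1
--         return 0
-- ===== SOURCE B (Python) =====
-- def _contains(q, p):
--     # p occurs as a contiguous block of q (early-exit scan, no slice list)
--     m = len(p)
--     if m == 0:
--         return True
--     first = p[0]
--     for s in range(len(q) - m + 1):
--         if q[s] == first and q[s:s + m] == p:
--             return True
--     return False
--
--
-- def findprime(paths):
--     # Backward pass; by transitivity of containment it suffices to test each
--     # path against the already-kept (prime) later paths.
--     kept = []
--     for idx in range(len(paths) - 1, -1, -1):
--         p = paths[idx]
--         if not any(_contains(q, p) for q in kept):
--             kept.append(p)
--     kept.reverse()
--     return kept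
-- ===== Notes on version B (the rewrite author's own statement) =====
-- stated objective: faster
-- what changed: Instead of A's forward pass testing each path against every later path with A_inc_B materialising the full list of window slices, B does one backward pass that tests each path only against the already-kept prime paths (sound by transitivity of contiguous containment) using an early-exit first-element scan.
-- crash fix: On the empty list A raises IndexError (paths[length-1]); B returns the empty list. — e.g. on findprime([]): A raises IndexError, B returns []
import Mathlib
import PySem

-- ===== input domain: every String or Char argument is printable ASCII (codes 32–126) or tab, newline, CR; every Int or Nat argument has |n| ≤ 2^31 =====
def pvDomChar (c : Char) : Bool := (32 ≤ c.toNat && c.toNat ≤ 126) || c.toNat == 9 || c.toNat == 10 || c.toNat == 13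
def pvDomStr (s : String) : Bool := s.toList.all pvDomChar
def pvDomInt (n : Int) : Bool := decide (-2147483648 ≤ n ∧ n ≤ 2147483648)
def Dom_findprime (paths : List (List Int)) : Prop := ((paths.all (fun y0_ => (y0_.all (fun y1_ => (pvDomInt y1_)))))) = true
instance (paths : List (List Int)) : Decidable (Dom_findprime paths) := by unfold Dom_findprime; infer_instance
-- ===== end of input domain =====

-- B replaces A's forward scan over ALL later paths (each test building every window slice)
-- with a backward pass that tests each path, with an early-exit scan, only against the
-- already-kept prime paths (correct by transitivity of containment); proved equal on
-- nonempty inputs (A raises IndexError on []).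

-- ===== PORT A =====
def A_inc_B (A B : List Int) : Int :=
  if (PySem.List.pyRange 0 ((B.length : Int) - (A.length : Int) + 1) 1).any
      (fun i => A == PySem.List.slice B (some i) (some (i + (A.length : Int)))) then 1 else 0

def findprime (paths : List (List Int)) : List (List Int) :=
  let length : Int := paths.length
  let primepath : List (List Int) :=
    (PySem.List.pyRange 0 (length - 1) 1).foldl (fun primepath i =>
      -- inner loop with break, modelled by a flag-guarded fold
      let flag : Int :=
        (PySem.List.pyRange (i + 1) length 1).foldl (fun (flag : Int) j =>
          if flag ≠ 0 then flag
          else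
            let A := PySem.List.pyGetD paths i []
            let B := PySem.List.pyGetD paths j []
            if A_inc_B A B ≠ 0 then 1 else flag) 0
      if flag = 0 then primepath ++ [PySem.List.pyGetD paths i []] else primepath) []
  primepath ++ [PySem.List.pyGetD paths (length - 1) []]

-- ===== PORT B =====
def pyContains (q p : List Int) : Bool :=
  let m : Int := p.length
  if m == 0 then true
  else
    let first := PySem.List.pyGetD p 0 0
    (PySem.List.pyRange 0 ((q.length : Int) - m + 1) 1).any
      (fun s => PySem.List.pyGetD q s 0 == first &&
        PySem.List.slice q (some s) (some (s + m)) == p)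

def findprime_alt (paths : List (List Int)) : List (List Int) :=
  let kept :=
    (PySem.List.pyRange ((paths.length : Int) - 1) (-1) (-1)).foldl
      (fun (kept : List (List Int)) idx =>
        let p := PySem.List.pyGetD paths idx []
        if !(kept.any (fun q => pyContains q p)) then kept ++ [p] else kept)
      []
  kept.reverse

-- ===== PRECONDITION & SPEC =====
-- A evaluates paths[length-1], which raises IndexError on the empty list.
def Pre_findprime (paths : List (List Int)) : Prop := paths ≠ []
instance (paths : List (List Int)) : Decidable (Pre_findprime paths) := by unfold Pre_findprime; infer_instance
def pvWitness_findprime : List (List Int) := [[1, 2], [3, 1, 2], [3]]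

-- On the empty list A raises IndexError (paths[length-1]); B returns the empty list .
def Raises_findprime (paths : List (List Int)) : Prop := paths = []
instance (paths : List (List Int)) : Decidable (Raises_findprime paths) := by unfold Raises_findprime; infer_instance
def pvRaiseWitness_findprime : List (List Int) := []
def pvRaiseWitnessOut_findprime : List (List Int) := []

def Spec_findprime (paths : List (List Int)) (out : List (List Int)) : Prop := out = findprime_alt paths
instance (paths : List (List Int)) (out : List (List Int)) : Decidable (Spec_findprime paths out) := by unfold Spec_findprime; infer_instance

-- ===== CLAIM (what is proved, stated in full; the proofs are below) =====
def Claim_equal_findprime : Prop := ∀ (paths : List (List Int)), Dom_findprime paths → Pre_findprime paths → Spec_findprime paths (findprime paths)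
def Claim_raises_findprime : Prop := (∀ (paths : List (List Int)), Dom_findprime paths → Raises_findprime paths → ¬ Pre_findprime paths) ∧ (Dom_findprime (pvRaiseWitness_findprime) ∧ Raises_findprime (pvRaiseWitness_findprime) ∧ findprime_alt (pvRaiseWitness_findprime) = pvRaiseWitnessOut_findprime)

-- ===== LEMMAS AND PROOFS =====

-- the keep condition both programs implement: no strictly later path contains the i-th path
def keepB (paths : List (List Int)) (i : Nat) : Bool :=
  !(paths.drop (i+1)).any (fun q => decide (paths.getD i [] <:+: q))

def target (paths : List (List Int)) : List (List Int) :=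
  ((List.range paths.length).filter (keepB paths)).map (fun i => paths.getD i [])

lemma take_drop_infix (p : List Int) (k m : Nat) : (p.drop k).take m <:+: p :=
  (List.take_prefix m (p.drop k)).isInfix.trans (List.drop_suffix k p).isInfix

lemma A_inc_B_ne_zero_iff (a b : List Int) : A_inc_B a b ≠ 0 ↔ a <:+: b := by
  have hiff : ((PySem.List.pyRange 0 ((b.length : Int) - (a.length : Int) + 1) 1).any
      (fun i => a == PySem.List.slice b (some i) (some (i + (a.length : Int))))) = true ↔ a <:+: b := by
    constructor
    · intro h'
      rcases List.any_eq_true.mp h' with ⟨i, hi, hslice⟩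
      rcases (PySem.List.mem_pyRange_one).mp hi with ⟨h0, _⟩
      obtain ⟨k, rfl⟩ := Int.eq_ofNat_of_zero_le h0
      rw [PySem.List.slice_natCast_add] at hslice
      have : a = (b.drop k).take a.length := by simpa using hslice
      rw [this]; exact take_drop_infix b k a.length
    · rintro ⟨u, v, rfl⟩
      refine List.any_eq_true.mpr ⟨(u.length : Int), ?_, ?_⟩
      · rw [PySem.List.mem_pyRange_one]
        refine ⟨by positivity, ?_⟩
        simp [List.length_append]; omega
      · rw [PySem.List.slice_natCast_add]
        simp [List.append_assoc]
  unfold A_inc_B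
  by_cases hc : ((PySem.List.pyRange 0 ((b.length : Int) - (a.length : Int) + 1) 1).any
      (fun i => a == PySem.List.slice b (some i) (some (i + (a.length : Int))))) = true
  · rw [if_pos hc]
    simpa using hiff.mp hc
  · rw [if_neg hc]
    simp only [ne_eq, not_true_eq_false, false_iff]
    simp only [hiff] at hc
    simpa using hc

-- the flag-guarded fold ('for … if …: flag=1; break') computes 'any'
lemma foldl_flag_stay (l : List Int) (P : Int → Prop) [DecidablePred P] :
    l.foldl (fun (flag : Int) j => if flag ≠ 0 then flag else if P j then 1 else flag) 1 = 1 := by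
  induction l with
  | nil => rfl
  | cons x t ih => simpa using ih

lemma foldl_flag (l : List Int) (P : Int → Prop) [DecidablePred P] :
    l.foldl (fun (flag : Int) j => if flag ≠ 0 then flag else if P j then 1 else flag) 0
      = if ∃ j ∈ l, P j then 1 else 0 := by
  induction l with
  | nil => simp
  | cons x t ih =>
    rw [List.foldl_cons]
    by_cases hx : P x
    · rw [show (if (0:Int) ≠ 0 then (0:Int) else if P x then 1 else 0) = 1 from by simp [hx],
        foldl_flag_stay]
      simp [hx]
    · rw [show (if (0:Int) ≠ 0 then (0:Int) else if P x then 1 else 0) = 0 from by simp [hx], ih]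
      simp [hx]

-- the early-exit scan decides contiguous containment
lemma pyContains_iff (q p : List Int) : pyContains q p = true ↔ p <:+: q := by
  unfold pyContains
  by_cases hm : p = []
  · subst hm
    simp [List.nil_infix]
  · obtain ⟨x, t, rfl⟩ := List.exists_cons_of_ne_nil hm
    rw [if_neg (by simp; omega)]
    simp only [List.any_eq_true, Bool.and_eq_true, beq_iff_eq]
    constructor
    · rintro ⟨s, hs, -, hslice⟩
      rcases PySem.List.mem_pyRange_one.mp hs with ⟨h0, -⟩
      obtain ⟨k, rfl⟩ := Int.eq_ofNat_of_zero_le h0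
      rw [show ((k : Int) + ((x :: t).length : Int)) = ((k : Int) + (((x :: t).length : Nat) : Int)) from by ring,
        PySem.List.slice_natCast_add] at hslice
      rw [← hslice]
      exact take_drop_infix q k (x :: t).length
    · rintro ⟨u, v, rfl⟩
      refine ⟨(u.length : Int), ?_, ?_, ?_⟩
      · rw [PySem.List.mem_pyRange_one]
        refine ⟨by positivity, ?_⟩
        simp only [List.length_append, List.length_cons]
        push_cast
        omega
      · have h0 : PySem.List.pyGetD (x :: t) 0 0 = x := by
          rw [show (0 : Int) = ((0 : Nat) : Int) from rfl, PySem.List.pyGetD_natCast]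
          rfl
        have hq : u ++ (x :: t) ++ v = u ++ x :: (t ++ v) := by simp
        rw [h0, PySem.List.pyGetD_natCast, hq, List.getD_eq_getElem?_getD,
          List.getElem?_append_right (le_refl u.length)]
        simp
      · rw [show ((u.length : Int) + ((x :: t).length : Int)) = ((u.length : Int) + (((x :: t).length : Nat) : Int)) from by ring,
          PySem.List.slice_natCast_add]
        simp [List.append_assoc]

-- A computes target
lemma exists_drop (paths : List (List Int)) (k : Nat) (Q : List Int → Prop) :
    (∃ j ∈ PySem.List.pyRange ((k : Int) + 1) ((paths.length : Int)) 1, Q (PySem.List.pyGetD paths j [])) ↔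
    ∃ q ∈ paths.drop (k+1), Q q := by
  have hd : paths.drop (k+1) =
      (PySem.List.pyRange ((k : Int) + 1) ((paths.length : Int)) 1).map (fun j => PySem.List.pyGetD paths j []) := by
    rw [PySem.List.map_pyGetD_pyRange' paths [] (by positivity)]
    norm_num
  rw [hd]
  constructor
  · rintro ⟨j, hj, hq⟩
    exact ⟨_, List.mem_map_of_mem hj, hq⟩
  · rintro ⟨q, hq, hQ⟩
    rcases List.mem_map.mp hq with ⟨j, hj, rfl⟩
    exact ⟨j, hj, hQ⟩

lemma keep_iff (paths : List (List Int)) (k : Nat) :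
    (¬ ∃ q ∈ paths.drop (k+1), paths.getD k [] <:+: q) ↔ keepB paths k = true := by
  simp [keepB]

lemma A_eq_target (paths : List (List Int)) (h : paths ≠ []) :
    findprime paths = target paths := by
  have hn : 0 < paths.length := List.length_pos_of_ne_nil h
  simp only [findprime]
  have h1 : ((paths.length : Int) - 1) = ((paths.length - 1 : Nat) : Int) := by omega
  rw [h1, PySem.List.pyRange_zero_natCast, List.foldl_map]
  rw [PySem.List.foldl_congr_mem' _ _
      (fun acc k => if keepB paths k then acc ++ [paths.getD k []] else acc) []
      (fun k hk acc => by
        rw [foldl_flag _ (fun j => A_inc_B (PySem.List.pyGetD paths (k : Int) []) (PySem.List.pyGetD paths j []) ≠ 0)]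
        by_cases hE : ∃ j ∈ PySem.List.pyRange ((k : Int) + 1) ((paths.length : Int)) 1,
            A_inc_B (PySem.List.pyGetD paths (k : Int) []) (PySem.List.pyGetD paths j []) ≠ 0
        · have hkeep : keepB paths k = false := by
            rw [← Bool.not_eq_true, ← keep_iff, not_not]
            rcases (exists_drop paths k
                (fun q => A_inc_B (PySem.List.pyGetD paths (k : Int) []) q ≠ 0)).mp hE with ⟨q, hq, hinc⟩
            rw [PySem.List.pyGetD_natCast] at hinc
            exact ⟨q, hq, (A_inc_B_ne_zero_iff _ _).mp hinc⟩
          rw [if_pos hE]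
          simp [hkeep]
        · have hkeep : keepB paths k = true := by
            rw [← keep_iff]
            intro ⟨q, hq, hinf⟩
            exact hE ((exists_drop paths k
              (fun q => A_inc_B (PySem.List.pyGetD paths (k : Int) []) q ≠ 0)).mpr
              ⟨q, hq, by rw [PySem.List.pyGetD_natCast]; exact (A_inc_B_ne_zero_iff _ _).mpr hinf⟩)
          rw [if_neg hE]
          simp [hkeep, PySem.List.pyGetD_natCast])]
  rw [PySem.List.foldl_append_if]
  have h2 : paths.length = (paths.length - 1) + 1 := by omega
  have hlast : keepB paths (paths.length - 1) = true := by
    rw [← keep_iff]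
    rintro ⟨q, hq, -⟩
    rw [← h2, List.drop_length] at hq
    exact absurd hq (List.not_mem_nil)
  unfold target
  conv_rhs => rw [h2, List.range_succ]
  rw [List.filter_append, List.map_append, List.filter_cons, List.filter_nil, if_pos hlast,
    PySem.List.pyGetD_natCast]
  simp

-- B computes target
def Bstep (paths : List (List Int)) (kept : List (List Int)) (idx : Int) : List (List Int) :=
  if !(kept.any (fun q => pyContains q (PySem.List.pyGetD paths idx [])))
    then kept ++ [PySem.List.pyGetD paths idx []] else kept

lemma B_fold (paths : List (List Int)) :
    ∀ (k a : Nat), a + k = paths.length →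
    (∀ t, ((∃ q ∈ (PySem.List.pyRange (a : Int) (paths.length : Int) 1).reverse.foldl
            (Bstep paths) [], t <:+: q)
        ↔ ∃ q ∈ paths.drop a, t <:+: q)) ∧
    (PySem.List.pyRange (a : Int) (paths.length : Int) 1).reverse.foldl (Bstep paths) []
      = (((List.range' a k).filter (keepB paths)).map (fun i => paths.getD i [])).reverse := by
  intro k
  induction k with
  | zero =>
    intro a ha
    have ha' : a = paths.length := by omega
    subst ha'
    rw [PySem.List.pyRange_one_eq_nil (le_refl _)]
    exact ⟨fun t => by simp [List.drop_length], by simp⟩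
  | succ k ih =>
    intro a ha
    have hlt : a < paths.length := by omega
    have hcons : PySem.List.pyRange (a : Int) (paths.length : Int) 1
        = (a : Int) :: PySem.List.pyRange ((a : Int) + 1) (paths.length : Int) 1 :=
      PySem.List.pyRange_one_cons (by exact_mod_cast hlt)
    have hcast : (((a + 1 : Nat)) : Int) = (a : Int) + 1 := by push_cast; ring
    obtain ⟨ih1, ih2⟩ := ih (a + 1) (by omega)
    rw [hcast] at ih1 ih2
    rw [hcons, List.reverse_cons, List.foldl_append, List.foldl_cons, List.foldl_nil]
    set kept' := (PySem.List.pyRange ((a : Int) + 1) (paths.length : Int) 1).reverse.foldl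
      (Bstep paths) [] with hkept'
    have hget : PySem.List.pyGetD paths (a : Int) [] = paths.getD a [] :=
      PySem.List.pyGetD_natCast paths a []
    have hdrop : paths.drop a = paths[a] :: paths.drop (a + 1) :=
      List.drop_eq_getElem_cons hlt
    have hgetD : paths.getD a [] = paths[a] := List.getD_eq_getElem paths [] hlt
    have hany : (kept'.any (fun q => pyContains q (PySem.List.pyGetD paths (a : Int) []))) = true
        ↔ ∃ q ∈ paths.drop (a + 1), paths.getD a [] <:+: q := by
      rw [List.any_eq_true]
      constructor
      · rintro ⟨q, hq, hc⟩
        rw [hget] at hc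
        exact (ih1 _).mp ⟨q, hq, (pyContains_iff _ _).mp hc⟩
      · intro hE
        rcases (ih1 _).mpr hE with ⟨q, hq, hinf⟩
        exact ⟨q, hq, by rw [hget]; exact (pyContains_iff _ _).mpr hinf⟩
    have hrange : List.range' a (k + 1) = a :: List.range' (a + 1) k := by rw [List.range'_succ]
    rw [hrange, List.filter_cons]
    by_cases hkeep : keepB paths a = true
    · have hnot : (kept'.any (fun q => pyContains q (PySem.List.pyGetD paths (a : Int) []))) = false := by
        rw [← Bool.not_eq_true, hany]
        exact (keep_iff paths a).mpr hkeep
      have hstep : Bstep paths kept' ((a : Nat) : Int) = kept' ++ [paths.getD a []] := by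
        rw [Bstep, hnot, hget]
        simp
      constructor
      · intro t
        rw [hstep, hdrop]
        simp only [List.mem_append, List.mem_cons, List.not_mem_nil, or_false, hgetD]
        constructor
        · rintro ⟨q, hq | rfl, hinf⟩
          · rcases (ih1 t).mp ⟨q, hq, hinf⟩ with ⟨r, hr, hinf'⟩
            exact ⟨r, Or.inr hr, hinf'⟩
          · exact ⟨paths[a], Or.inl rfl, hinf⟩
        · rintro ⟨q, rfl | hq, hinf⟩
          · exact ⟨paths[a], Or.inr rfl, hinf⟩
          · rcases (ih1 t).mpr ⟨q, hq, hinf⟩ with ⟨r, hr, hinf'⟩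
            exact ⟨r, Or.inl hr, hinf'⟩
      · rw [hstep, if_pos hkeep, ih2]
        simp
    · have hcont : ∃ r ∈ paths.drop (a + 1), paths.getD a [] <:+: r := by
        by_contra hno
        exact hkeep ((keep_iff paths a).mp hno)
      have hyes : (kept'.any (fun q => pyContains q (PySem.List.pyGetD paths (a : Int) []))) = true :=
        hany.mpr hcont
      have hstep : Bstep paths kept' ((a : Nat) : Int) = kept' := by
        rw [Bstep, hyes]
        simp
      constructor
      · intro t
        rw [hstep, hdrop]
        simp only [List.mem_cons]
        constructor
        · rintro hE
          rcases (ih1 t).mp hE with ⟨r, hr, hinf'⟩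
          exact ⟨r, Or.inr hr, hinf'⟩
        · rintro ⟨q, rfl | hq, hinf⟩
          · rcases hcont with ⟨r, hr, hinf'⟩
            rw [hgetD] at hinf'
            exact (ih1 t).mpr ⟨r, hr, hinf.trans hinf'⟩
          · exact (ih1 t).mpr ⟨q, hq, hinf⟩
      · rw [hstep, if_neg hkeep, ih2]

lemma B_eq_target (paths : List (List Int)) :
    findprime_alt paths = target paths := by
  simp only [findprime_alt]
  have hrev : PySem.List.pyRange ((paths.length : Int) - 1) (-1) (-1)
      = (PySem.List.pyRange 0 (paths.length : Int) 1).reverse := by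
    rw [PySem.List.pyRange_neg_one_eq_reverse]
    norm_num
  rw [hrev]
  have hstep : (fun (kept : List (List Int)) idx =>
      if !(kept.any (fun q => pyContains q (PySem.List.pyGetD paths idx [])))
        then kept ++ [PySem.List.pyGetD paths idx []] else kept) = Bstep paths := rfl
  obtain ⟨-, h2⟩ := B_fold paths paths.length 0 (by omega)
  rw [show ((0 : Nat) : Int) = 0 from rfl] at h2
  rw [hstep, h2, List.reverse_reverse, ← List.range_eq_range']
  rfl

-- ===== VERDICT (by name: the statement is the Claim_ definition above) =====
theorem findprime_spec : Claim_equal_findprime := by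
  intro paths _ hpre
  unfold Spec_findprime
  rw [A_eq_target paths hpre, B_eq_target paths]

@[simp] theorem findprime_raises : Claim_raises_findprime := by
  unfold Claim_raises_findprime
  exact ⟨fun paths _ h => by simp [Raises_findprime] at h; simp [Pre_findprime, h], by decide⟩
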